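-- pv_equiv track=rewrite | github.com/robin-na/PGG-finetuning | forecasting/pgg/profile_sampling/build_pgg_transfer_benchmark.py | target_rows
-- ===== SOURCE A (Python) =====
-- from typing import Dict, Iterable, List, Set, Tuple
--
-- def ref_for_row(row: Dict[str, str]) -> str:
--     return f"{row['block_name']}::{row['question_id']}"
--
-- def qids_for_family(
--     rows: Iterable[Dict[str, str]],
--     family: str,
--     include_text: bool,
--     source_by_ref: Dict[str, str],
-- ) -> List[Dict[str, str]]:
--     out = []
--     for row in rows:
--         if row["family"] != family:
--             continue
--         if source_by_ref.get(ref_for_row(row)) != "wave1_3_persona_json":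
--             continue
--         if row["question_type"] == "DB":
--             continue
--         if not include_text and row["question_type"] == "TE":
--             continue
--         out.append(row)
--     return out
--
-- def target_rows(
--     rows: Iterable[Dict[str, str]],
--     target_family: str,
--     source_by_ref: Dict[str, str],
-- ) -> Tuple[List[Dict[str, str]], List[Dict[str, str]]]:
--     all_rows = qids_for_family(rows, target_family, include_text=True, source_by_ref=source_by_ref)
--     choice_rows = [row for row in all_rows if row["question_type"] != "TE"]
--     return all_rows, choice_rows
-- ===== SOURCE B (Python) =====
-- from typing import Dict, Iterable, List, Tuple
--
-- def ref_for_row(row: Dict[str, str]) -> str: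
--     return f"{row['block_name']}::{row['question_id']}"
--
-- def target_rows(
--     rows: Iterable[Dict[str, str]],
--     target_family: str,
--     source_by_ref: Dict[str, str],
-- ) -> Tuple[List[Dict[str, str]], List[Dict[str, str]]]:
--     # One fused pass: maintain both result lists while scanning rows once.
--     all_rows: List[Dict[str, str]] = []
--     choice_rows: List[Dict[str, str]] = []
--     for row in rows:
--         if row["family"] != target_family:
--             continue
--         if source_by_ref.get(ref_for_row(row)) != "wave1_3_persona_json":
--             continue
--         qt = row["question_type"]
--         if qt == "DB":
--             continue
--         all_rows.append(row)
--         if qt != "TE":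
--             choice_rows.append(row)
--     return all_rows, choice_rows
-- ===== Notes on version B (the rewrite author's own statement) =====
-- stated objective: simpler
-- what changed: Replaces A's two sequential passes (a generic qids_for_family filter with an include_text flag, then a list-comprehension sub-filter over its output) with one fused loop over rows that maintains both all_rows and choice_rows in the same iteration, dropping the helper and the dead include_text branch.
import Mathlib
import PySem

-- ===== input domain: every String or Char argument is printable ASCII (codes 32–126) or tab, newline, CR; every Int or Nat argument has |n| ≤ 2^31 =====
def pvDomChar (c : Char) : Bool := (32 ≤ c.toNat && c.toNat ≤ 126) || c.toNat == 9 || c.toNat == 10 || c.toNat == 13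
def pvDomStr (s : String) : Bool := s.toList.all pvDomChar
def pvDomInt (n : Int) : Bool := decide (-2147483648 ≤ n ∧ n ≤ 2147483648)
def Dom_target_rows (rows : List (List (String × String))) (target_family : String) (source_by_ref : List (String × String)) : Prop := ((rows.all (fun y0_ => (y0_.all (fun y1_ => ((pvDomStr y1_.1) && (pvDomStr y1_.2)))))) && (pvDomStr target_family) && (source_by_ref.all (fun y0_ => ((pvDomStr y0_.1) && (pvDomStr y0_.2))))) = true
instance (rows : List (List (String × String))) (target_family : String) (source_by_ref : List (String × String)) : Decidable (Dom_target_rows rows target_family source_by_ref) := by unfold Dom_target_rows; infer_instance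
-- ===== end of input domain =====

-- B fuses A's two passes (filter helper + sub-filter comprehension) into one loop
-- maintaining both lists; equivalence of return values is proved on inputs where A
-- raises no KeyError (Pre_). No argument is mutated.

-- rows and source_by_ref are Python dicts ported as association lists; lookup = first match.
-- row[k] (KeyError when absent): total stand-in returning "" — Pre_ guarantees presence.
def pvGetKey (row : List (String × String)) (k : String) : String :=
  (List.lookup k row).getD ""

-- ===== PORT A =====
def ref_for_row_A (row : List (String × String)) : String :=
  pvGetKey row "block_name" ++ "::" ++ pvGetKey row "question_id"

def qids_for_family_A (rows : List (List (String × String))) (family : String)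
    (include_text : Bool) (source_by_ref : List (String × String)) :
    List (List (String × String)) :=
  rows.foldl (fun out row =>
    if pvGetKey row "family" ≠ family then out
    else if List.lookup (ref_for_row_A row) source_by_ref ≠ some "wave1_3_persona_json" then out
    else if pvGetKey row "question_type" = "DB" then out
    else if ¬ include_text ∧ pvGetKey row "question_type" = "TE" then out
    else out ++ [row]) []

def target_rows (rows : List (List (String × String))) (target_family : String) (source_by_ref : List (String × String)) : (List (List (String × String))) × (List (List (String × String))) :=
  let all_rows := qids_for_family_A rows target_family true source_by_ref
  let choice_rows := all_rows.filter (fun row => pvGetKey row "question_type" ≠ "TE")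
  (all_rows, choice_rows)

-- ===== PORT B =====
def ref_for_row_B (row : List (String × String)) : String :=
  pvGetKey row "block_name" ++ "::" ++ pvGetKey row "question_id"

def target_rows_alt (rows : List (List (String × String))) (target_family : String) (source_by_ref : List (String × String)) : (List (List (String × String))) × (List (List (String × String))) :=
  rows.foldl (fun st row =>
    if pvGetKey row "family" ≠ target_family then st
    else if List.lookup (ref_for_row_B row) source_by_ref ≠ some "wave1_3_persona_json" then st
    else
      let qt := pvGetKey row "question_type"
      if qt = "DB" then st
      else (st.1 ++ [row], if qt ≠ "TE" then st.2 ++ [row] else st.2))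
    ([], [])

-- ===== PRECONDITION & SPEC =====
-- Pre_ excludes exactly the inputs on which Python A raises KeyError: a row missing a key
-- at the point the algorithm reads it ("family" always; "block_name"/"question_id" once the
-- family matches; "question_type" once the source lookup also matches).
def Pre_target_rows (rows : List (List (String × String))) (target_family : String) (source_by_ref : List (String × String)) : Prop :=
  ∀ row ∈ rows, (List.lookup "family" row).isSome ∧
    (List.lookup "family" row = some target_family →
      (List.lookup "block_name" row).isSome ∧ (List.lookup "question_id" row).isSome ∧
      (List.lookup ((List.lookup "block_name" row).getD "" ++ "::" ++ (List.lookup "question_id" row).getD "") source_by_ref = some "wave1_3_persona_json" →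
        (List.lookup "question_type" row).isSome))

instance (rows : List (List (String × String))) (target_family : String) (source_by_ref : List (String × String)) : Decidable (Pre_target_rows rows target_family source_by_ref) := by unfold Pre_target_rows; infer_instance

def pvWitness_target_rows : (List (List (String × String))) × String × (List (String × String)) :=
  ([[("family", "f"), ("block_name", "b"), ("question_id", "q"), ("question_type", "MC")]],
   "f", [("b::q", "wave1_3_persona_json")])

def Spec_target_rows (rows : List (List (String × String))) (target_family : String) (source_by_ref : List (String × String)) (out : (List (List (String × String))) × (List (List (String × String)))) : Prop := out = target_rows_alt rows target_family source_by_ref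
instance (rows : List (List (String × String))) (target_family : String) (source_by_ref : List (String × String)) (out : (List (List (String × String))) × (List (List (String × String)))) : Decidable (Spec_target_rows rows target_family source_by_ref out) := by unfold Spec_target_rows; infer_instance

-- ===== CLAIM (what is proved, stated in full; the proofs are below) =====
def Claim_equal_target_rows : Prop := ∀ (rows : List (List (String × String))) (target_family : String) (source_by_ref : List (String × String)), Dom_target_rows rows target_family source_by_ref → Pre_target_rows rows target_family source_by_ref → Spec_target_rows rows target_family source_by_ref (target_rows rows target_family source_by_ref)

-- ===== LEMMAS AND PROOFS =====

-- named copies of the two fold bodies (definitionally equal to the lambdas in the ports)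
def stepA (tf : String) (sbr : List (String × String))
    (out : List (List (String × String))) (row : List (String × String)) :
    List (List (String × String)) :=
  if pvGetKey row "family" ≠ tf then out
  else if List.lookup (ref_for_row_A row) sbr ≠ some "wave1_3_persona_json" then out
  else if pvGetKey row "question_type" = "DB" then out
  else if ¬ (true : Bool) ∧ pvGetKey row "question_type" = "TE" then out
  else out ++ [row]

def stepB (tf : String) (sbr : List (String × String))
    (st : (List (List (String × String))) × (List (List (String × String))))
    (row : List (String × String)) :
    (List (List (String × String))) × (List (List (String × String))) :=
  if pvGetKey row "family" ≠ tf then st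
  else if List.lookup (ref_for_row_B row) sbr ≠ some "wave1_3_persona_json" then st
  else
    let qt := pvGetKey row "question_type"
    if qt = "DB" then st
    else (st.1 ++ [row], if qt ≠ "TE" then st.2 ++ [row] else st.2)

def pvKeep (tf : String) (sbr : List (String × String)) (row : List (String × String)) : Bool :=
  (pvGetKey row "family" == tf)
  && (List.lookup (ref_for_row_A row) sbr == some "wave1_3_persona_json")
  && !(pvGetKey row "question_type" == "DB")

theorem stepA_eq (tf : String) (sbr : List (String × String)) (out : List (List (String × String))) (row : List (String × String)) :
    stepA tf sbr out row = if pvKeep tf sbr row then out ++ [row] else out := by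
  unfold stepA pvKeep
  split_ifs <;> simp_all

theorem stepB_eq (tf : String) (sbr : List (String × String)) (st : (List (List (String × String))) × (List (List (String × String)))) (row : List (String × String)) :
    stepB tf sbr st row =
      (if pvKeep tf sbr row then st.1 ++ [row] else st.1,
       if pvKeep tf sbr row && !(pvGetKey row "question_type" == "TE") then st.2 ++ [row] else st.2) := by
  unfold stepB pvKeep ref_for_row_A ref_for_row_B
  split_ifs <;> simp_all

theorem foldA_acc (tf : String) (sbr : List (String × String)) (rows : List (List (String × String))) (out : List (List (String × String))) :
    rows.foldl (stepA tf sbr) out = out ++ rows.foldl (stepA tf sbr) [] := by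
  induction rows generalizing out with
  | nil => simp
  | cons row rest ih =>
    rw [List.foldl_cons, List.foldl_cons, stepA_eq, stepA_eq]
    by_cases h : pvKeep tf sbr row = true
    · rw [if_pos h, if_pos h, ih (out ++ [row]), ih ([] ++ [row])]
      simp
    · rw [if_neg h, if_neg h, ih out]

theorem foldB_main (tf : String) (sbr : List (String × String)) (rows : List (List (String × String))) (a c : List (List (String × String))) :
    rows.foldl (stepB tf sbr) (a, c)
      = (a ++ rows.foldl (stepA tf sbr) [],
         c ++ (rows.foldl (stepA tf sbr) []).filter
                (fun row => pvGetKey row "question_type" ≠ "TE")) := by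
  induction rows generalizing a c with
  | nil => simp
  | cons row rest ih =>
    rw [List.foldl_cons, stepB_eq, List.foldl_cons, stepA_eq, foldA_acc tf sbr rest]
    by_cases h : pvKeep tf sbr row = true
    · rw [if_pos h]
      by_cases hte : pvGetKey row "question_type" = "TE"
      · have hc : (pvKeep tf sbr row && !(pvGetKey row "question_type" == "TE")) = false := by
          simp [hte]
        rw [hc, if_neg Bool.false_ne_true, ih]
        simp [h, hte]
      · have : (pvKeep tf sbr row && !(pvGetKey row "question_type" == "TE")) = true := by
          simp [h, hte]
        rw [if_pos this, ih]
        simp [h, hte]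
    · rw [if_neg h, if_neg (by simp [h])]
      rw [ih]
      simp_all

-- ===== VERDICT (by name: the statement is the Claim_ definition above) =====
theorem target_rows_spec : Claim_equal_target_rows := by
  intro rows tf sbr _ _
  show target_rows rows tf sbr = target_rows_alt rows tf sbr
  have hB : target_rows_alt rows tf sbr = rows.foldl (stepB tf sbr) ([], []) := rfl
  have hA : qids_for_family_A rows tf true sbr = rows.foldl (stepA tf sbr) [] := rfl
  rw [target_rows, hB, foldB_main]
  simp [hA]
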